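-- pv_equiv track=rewrite | github.com/jwang6174/scg-co | hemo_record.py | get_record_names_unique
-- ===== SOURCE A (Python) =====
-- def get_record_names_unique(record_names):
--   patient_codes = {}
--   for record_name in record_names:
--     parts = record_name.split('-')
--     code = parts[0]
--     patient_codes.setdefault(code, []).append(record_name)
--
--   unique = []
--   for sublist in patient_codes.values():
--     if len(sublist) == 1:
--       unique.append(sublist[0])
--
--   return unique
-- ===== SOURCE B (Python) =====
-- def get_record_names_unique(record_names):
--   counts = {}
--   for record_name in record_names:
--     code = record_name.split('-')[0]
--     counts[code] = counts.get(code, 0) + 1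
--   return [record_name for record_name in record_names
--           if counts[record_name.split('-')[0]] == 1]
-- ===== Notes on version B (the rewrite author's own statement) =====
-- stated objective: idiomatic
-- what changed: B replaces A's dict-of-lists grouping plus a second loop over dict values with a single integer counter of prefix codes and a filtering pass over the original input list.
import Mathlib
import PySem

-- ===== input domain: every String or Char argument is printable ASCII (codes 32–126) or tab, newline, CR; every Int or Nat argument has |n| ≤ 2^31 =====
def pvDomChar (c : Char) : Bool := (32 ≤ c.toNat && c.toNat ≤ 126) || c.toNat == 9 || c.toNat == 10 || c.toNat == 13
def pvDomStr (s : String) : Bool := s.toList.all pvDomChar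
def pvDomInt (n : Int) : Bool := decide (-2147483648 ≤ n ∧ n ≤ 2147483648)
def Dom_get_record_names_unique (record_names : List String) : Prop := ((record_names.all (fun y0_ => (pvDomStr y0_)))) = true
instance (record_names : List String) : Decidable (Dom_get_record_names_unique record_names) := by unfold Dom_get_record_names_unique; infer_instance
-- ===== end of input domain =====

-- B groups by an integer counter of prefix codes and filters the original list,
-- instead of A's dict-of-lists grouping followed by a loop over the dict values (idiomatic; same cost).

-- ===== PORT A =====
-- record_name.split('-')[0]: split? is none only for an empty separator and a nonempty
-- separator yields a nonempty list, so both `.getD` defaults are never used.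
def pvCode (s : String) : String :=
  (PySem.List.pyGet? ((PySem.Str.split? s "-").getD []) 0).getD ""

def get_record_names_unique (record_names : List String) : List String :=
  -- patient_codes.setdefault(code, []).append(record_name)  ==  d[code] = d.get(code, []) + [record_name]
  let patient_codes : PySem.Dict String (List String) :=
    record_names.foldl
      (fun d record_name => d.modify (pvCode record_name) [] (fun g => g ++ [record_name]))
      PySem.Dict.empty
  -- sublist[0] is guarded by len(sublist) == 1, so index 0 is in range and `.getD ""` is never used.
  patient_codes.values.foldl
    (fun unique sublist =>
      if sublist.length == 1 then unique ++ [(PySem.List.pyGet? sublist 0).getD ""] else unique)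
    []

-- ===== PORT B =====
def get_record_names_unique_alt (record_names : List String) : List String :=
  let counts : PySem.Dict String Int :=
    record_names.foldl
      (fun d record_name => d.insert (pvCode record_name) (d.getD (pvCode record_name) 0 + 1))
      PySem.Dict.empty
  -- counts[code] in the comprehension: the key is always present, so `.getD 0` equals Python's d[k].
  record_names.filter (fun record_name => counts.getD (pvCode record_name) 0 == 1)

-- ===== PRECONDITION & SPEC =====
def Spec_get_record_names_unique (record_names : List String) (out : List String) : Prop := out = get_record_names_unique_alt record_names
instance (record_names : List String) (out : List String) : Decidable (Spec_get_record_names_unique record_names out) := by unfold Spec_get_record_names_unique; infer_instance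

-- ===== CLAIM (what is proved, stated in full; the proofs are below) =====
def Claim_equal_get_record_names_unique : Prop := ∀ (record_names : List String), Dom_get_record_names_unique record_names → Spec_get_record_names_unique record_names (get_record_names_unique record_names)

-- ===== LEMMAS AND PROOFS =====

theorem ofList_append_singleton {α : Type} [BEq α] [LawfulBEq α] (m : List α) (c : α) :
    PySem.Set.ofList (m ++ [c]) =
      if c ∈ PySem.Set.ofList m then PySem.Set.ofList m else PySem.Set.ofList m ++ [c] := by
  rw [PySem.Set.ofList_eq_foldl, List.foldl_append, ← PySem.Set.ofList_eq_foldl]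
  simp [PySem.Set.add, PySem.Set.contains]

theorem group_singleton (l : List String) (k : String)
    (h : ((l.filter (fun y => pvCode y == k)).length == 1) = true) :
    ∃ y, l.filter (fun y => pvCode y == k) = [y] ∧ pvCode y = k ∧
      (PySem.List.pyGet? (l.filter (fun y => pvCode y == k)) 0).getD "" = y := by
  rcases List.length_eq_one_iff.mp (by simpa using h) with ⟨y, hy⟩
  refine ⟨y, hy, ?_, ?_⟩
  · have : y ∈ l.filter (fun y => pvCode y == k) := by rw [hy]; simp
    simpa using (List.mem_filter.mp this).2
  · rw [hy]; simp [PySem.List.pyGet?, PySem.List.pyIdx?]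

theorem filter_map_keys (ks : List String) (F : String → String) (c : String)
    (h : ∀ k ∈ ks, pvCode (F k) = k) :
    (ks.filter (fun k => !(k == c))).map F = (ks.map F).filter (fun y => !(pvCode y == c)) := by
  rw [List.filter_map]
  apply congrArg
  apply List.filter_congr
  intro k hk
  simp [h k hk]

theorem key_lemma (l : List String) :
    ((PySem.Set.ofList (l.map pvCode)).filter
        (fun k => (l.filter (fun x => pvCode x == k)).length == 1)).map
      (fun k => (PySem.List.pyGet? (l.filter (fun x => pvCode x == k)) 0).getD "") =
    l.filter (fun r => (((l.map pvCode).count (pvCode r) : Int) == 1)) := by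
  induction l using List.reverseRecOn with
  | nil => simp
  | append_singleton l x ih =>
    simp only [List.map_append, List.map_cons, List.map_nil]
    rw [ofList_append_singleton]
    have hG : ∀ k, (l ++ [x]).filter (fun y => pvCode y == k) =
        (l.filter (fun y => pvCode y == k)) ++ (if pvCode x == k then [x] else []) := by
      intro k; rw [List.filter_append, List.filter_singleton]; cases pvCode x == k <;> rfl
    have hcnt : ∀ s, (List.map pvCode l ++ [pvCode x]).count s =
        (l.map pvCode).count s + (if pvCode x = s then 1 else 0) := by
      intro s
      rw [List.count_append]
      by_cases e : pvCode x = s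
      · simp [e]
      · have h0 : List.count s [pvCode x] = 0 :=
          List.count_eq_zero.mpr (by simp; exact fun h' => e h'.symm)
        simp [e, h0]
    by_cases h : pvCode x ∈ PySem.Set.ofList (l.map pvCode)
    · -- code of x already seen: its group grows past length 1; both sides drop its elements
      rw [if_pos h]
      have hmem : pvCode x ∈ l.map pvCode := (PySem.Set.mem_ofList _ _).mp h
      have hcpos : 0 < (l.map pvCode).count (pvCode x) := List.count_pos_iff.mpr hmem
      have hp : ∀ k, (((l ++ [x]).filter (fun y => pvCode y == k)).length == 1) =
          ((!(k == pvCode x)) && ((l.filter (fun y => pvCode y == k)).length == 1)) := by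
        intro k
        rw [hG k]
        by_cases hk : pvCode x = k
        · have h1 : 0 < (l.filter (fun y => pvCode y == k)).length := by
            rcases List.mem_map.mp hmem with ⟨y, hy, hcy⟩
            have : y ∈ l.filter (fun z => pvCode z == k) :=
              List.mem_filter.mpr ⟨hy, by simp [hcy, hk]⟩
            exact List.length_pos_iff.mpr (List.ne_nil_of_mem this)
          simp only [hk, beq_self_eq_true, if_true, Bool.not_true, Bool.false_and,
            List.length_append, List.length_cons, List.length_nil]
          simp only [beq_iff_eq, Bool.eq_false_iff, ne_eq]
          omega
        · have h2 : (pvCode x == k) = false := by simp [hk]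
          have h3 : (k == pvCode x) = false := by simp; exact fun e => hk e.symm
          simp [h2, h3]
      rw [List.filter_congr (fun k _ => hp k), ← List.filter_filter]
      have hmapc : ∀ k ∈ ((PySem.Set.ofList (l.map pvCode)).filter
            (fun k => (l.filter (fun y => pvCode y == k)).length == 1)).filter
            (fun k => !(k == pvCode x)),
          (fun k => (PySem.List.pyGet? ((l ++ [x]).filter (fun y => pvCode y == k)) 0).getD "") k
          = (fun k => (PySem.List.pyGet? (l.filter (fun y => pvCode y == k)) 0).getD "") k := by
        intro k hk
        have hkc : ¬ (k = pvCode x) := by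
          have := (List.mem_filter.mp hk).2; simpa using this
        have h2 : (pvCode x == k) = false := by simp; exact fun e => hkc e.symm
        simp only [hG k, h2, Bool.false_eq_true, if_false, List.append_nil]
      rw [List.map_congr_left hmapc]
      have hcode : ∀ k ∈ (PySem.Set.ofList (l.map pvCode)).filter
            (fun k => (l.filter (fun y => pvCode y == k)).length == 1),
          pvCode ((fun k => (PySem.List.pyGet? (l.filter (fun y => pvCode y == k)) 0).getD "") k) = k := by
        intro k hk
        rcases group_singleton l k (List.mem_filter.mp hk).2 with ⟨y, _, hcy, hval⟩
        simpa [hval] using hcy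
      rw [filter_map_keys _ _ _ hcode, ih]
      -- right-hand side: drop x and every record whose code is pvCode x
      rw [List.filter_append, List.filter_singleton]
      have hqx : ((((List.map pvCode l ++ [pvCode x]).count (pvCode x) : Nat) : Int) == 1) = false := by
        rw [hcnt]
        simp only [beq_iff_eq, Bool.eq_false_iff, ne_eq]
        push_cast
        omega
      rw [hqx]
      simp only [Bool.cond_false, List.append_nil]
      have hq : ∀ r, ((((List.map pvCode l ++ [pvCode x]).count (pvCode r) : Nat) : Int) == 1)
          = ((!(pvCode r == pvCode x)) && ((((l.map pvCode).count (pvCode r) : Nat) : Int) == 1)) := by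
        intro r
        rw [hcnt]
        by_cases hr : pvCode x = pvCode r
        · have hrc : (pvCode r == pvCode x) = true := by simp [hr]
          rw [hr] at hcpos
          simp only [if_pos hr, hrc, Bool.not_true, Bool.false_and]
          simp only [beq_iff_eq, Bool.eq_false_iff, ne_eq]
          push_cast
          omega
        · have hrc : (pvCode r == pvCode x) = false := by simp; exact fun e => hr e.symm
          simp [hr, hrc]
      rw [List.filter_congr (fun r _ => hq r), ← List.filter_filter]
    · -- fresh code: a new singleton group appears at the end; x is appended on both sides
      rw [if_neg h]
      have hmem : pvCode x ∉ l.map pvCode := fun hm => h ((PySem.Set.mem_ofList _ _).mpr hm)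
      have hGx : l.filter (fun y => pvCode y == pvCode x) = [] := by
        apply List.filter_eq_nil_iff.mpr
        intro y hy
        simp only [beq_iff_eq]
        exact fun e => hmem (List.mem_map.mpr ⟨y, hy, e⟩)
      have hGk : ∀ k ∈ PySem.Set.ofList (l.map pvCode),
          (l ++ [x]).filter (fun y => pvCode y == k) = l.filter (fun y => pvCode y == k) := by
        intro k hk
        have hkx : ¬ (k = pvCode x) := fun e => h (e ▸ hk)
        have h2 : (pvCode x == k) = false := by simp; exact fun e => hkx e.symm
        rw [hG k, h2]
        simp
      rw [List.filter_append (l₁ := PySem.Set.ofList (l.map pvCode))]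
      have hpc : (((l ++ [x]).filter (fun y => pvCode y == pvCode x)).length == 1) = true := by
        rw [hG (pvCode x), hGx]; simp
      have hfilts : ([pvCode x].filter
          (fun k => ((l ++ [x]).filter (fun y => pvCode y == k)).length == 1)) = [pvCode x] := by
        rw [List.filter_singleton, hpc]; simp
      rw [hfilts, List.filter_congr (fun k hk => by rw [hGk k hk]), List.map_append]
      have hfx : (PySem.List.pyGet? ((l ++ [x]).filter (fun y => pvCode y == pvCode x)) 0).getD "" = x := by
        rw [hG (pvCode x), hGx]
        simp [PySem.List.pyGet?, PySem.List.pyIdx?]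
      have hmap2 : ∀ k ∈ (PySem.Set.ofList (l.map pvCode)).filter
            (fun k => (l.filter (fun y => pvCode y == k)).length == 1),
          (fun k => (PySem.List.pyGet? ((l ++ [x]).filter (fun y => pvCode y == k)) 0).getD "") k
          = (fun k => (PySem.List.pyGet? (l.filter (fun y => pvCode y == k)) 0).getD "") k := by
        intro k hk
        simp only [hGk k (List.mem_filter.mp hk).1]
      rw [List.map_congr_left hmap2, ih]
      simp only [List.map_cons, List.map_nil, hfx]
      -- right-hand side: x is kept (its code is new), everything else is unchanged
      rw [List.filter_append, List.filter_singleton]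
      have h0 : (l.map pvCode).count (pvCode x) = 0 := List.count_eq_zero.mpr hmem
      have hqx : ((((List.map pvCode l ++ [pvCode x]).count (pvCode x) : Nat) : Int) == 1) = true := by
        rw [hcnt]
        simp [h0]
      rw [hqx]
      simp only [Bool.cond_true]
      have hq2 : ∀ r ∈ l, ((((List.map pvCode l ++ [pvCode x]).count (pvCode r) : Nat) : Int) == 1)
          = ((((l.map pvCode).count (pvCode r) : Nat) : Int) == 1) := by
        intro r hr
        have hne : ¬ (pvCode x = pvCode r) := fun e => hmem (e ▸ List.mem_map.mpr ⟨r, hr, rfl⟩)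
        rw [hcnt]
        simp [hne]
      rw [List.filter_congr hq2]

theorem A_closed (l : List String) :
    get_record_names_unique l =
      ((PySem.Set.ofList (l.map pvCode)).filter
          (fun k => (l.filter (fun x => pvCode x == k)).length == 1)).map
        (fun k => (PySem.List.pyGet? (l.filter (fun x => pvCode x == k)) 0).getD "") := by
  unfold get_record_names_unique
  set D := l.foldl
      (fun d record_name => d.modify (pvCode record_name) [] (fun g => g ++ [record_name]))
      PySem.Dict.empty with hD
  have hkeys : D.keys = PySem.Set.ofList (l.map pvCode) := by
    rw [hD, PySem.Dict.keys_foldl_modify_key l pvCode [] (fun _ record_name => (fun g => g ++ [record_name]))]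
    simp [PySem.Set.ofList_eq_foldl, PySem.Set.update, PySem.Dict.keys_empty]
  have hnd : D.keys.Nodup := by rw [hkeys]; exact PySem.Set.nodup_ofList _
  have hget : ∀ k, D.getD k [] = l.filter (fun x => pvCode x == k) := by
    intro k
    rw [hD, ← List.foldl_map (f := fun x => (pvCode x, x))
        (g := fun (d : PySem.Dict String (List String)) p => d.modify p.1 [] (fun g => g ++ [p.2])),
        PySem.Dict.getD_foldl_modify_append, PySem.Dict.getD_empty]
    rw [List.filter_map, List.map_map]
    simp [Function.comp_def]
  rw [PySem.List.foldl_append_if (p := fun (sub : List String) => sub.length == 1)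
        (f := fun sub => (PySem.List.pyGet? sub 0).getD "")]
  rw [PySem.Dict.values_eq_map_keys D hnd [], hkeys]
  rw [List.filter_map, List.map_map]
  simp only [Function.comp_def, hget]
  simp

theorem B_closed (l : List String) :
    get_record_names_unique_alt l =
      l.filter (fun r => (((l.map pvCode).count (pvCode r) : Int) == 1)) := by
  unfold get_record_names_unique_alt
  have hc : ∀ c, ((l.foldl
      (fun d record_name => d.insert (pvCode record_name) (d.getD (pvCode record_name) 0 + 1))
      PySem.Dict.empty : PySem.Dict String Int)).getD c 0 = ((l.map pvCode).count c : Int) := by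
    intro c
    rw [← List.foldl_map (f := pvCode) (g := fun (d : PySem.Dict String Int) x => d.insert x (d.getD x 0 + 1)),
        PySem.Dict.getD_foldl_insert_add_one]
    simp [PySem.Dict.getD_empty]
  simp only [hc]

-- ===== VERDICT (by name: the statement is the Claim_ definition above) =====
theorem get_record_names_unique_spec : Claim_equal_get_record_names_unique := by
  intro l _
  unfold Spec_get_record_names_unique
  rw [A_closed, B_closed, key_lemma]
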